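-- pv_equiv track=rewrite | github.com/pypi-data/pypi-mirror-237 | packages/Quanthon/Quanthon-0.1.2-py3-none-any.whl/Quanthon/Expectation.py | get_cnots
-- ===== SOURCE A (Python) =====
-- def _no_pauli_after_i(pauli_str):
--
--     detected_I = False
--     for op in pauli_str:
--         if not detected_I:
--             if op == 'I':
--                 detected_I = True
--                 continue
--             else:
--                 continue
--         if op != 'I':
--             return False
--     return True
--
-- def get_cnots(pauli_str):
--
--     if not _no_pauli_after_i:
--         raise ValueError('Pauli string must not have any Pauli operator after I.')
--     cnot_pairs = []
--
--     for i in range(len(pauli_str)-1):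
--         if pauli_str[i+1] == 'I':
--             break
--         cnot_pairs.append((i+1, i))
--
--     return cnot_pairs
-- ===== SOURCE B (Python) =====
-- def get_cnots(pauli_str):
--     n = len(pauli_str)
--     boundary = n
--     for i in reversed(range(1, n)):
--         if pauli_str[i] == 'I':
--             boundary = i
--     return [(i + 1, i) for i in range(boundary - 1)]
-- ===== Notes on version B (the rewrite author's own statement) =====
-- stated objective: alternative
-- what changed: Replaces the forward scan-append-break loop (and the dead always-truthy guard on the helper function object) by a full backward pass over the string that tracks the index of the first identity operator at position >= 1, followed by generating the pair list in one comprehension; the traversal order and what the loop maintains are different, and no early exit is needed.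
import Mathlib
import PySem

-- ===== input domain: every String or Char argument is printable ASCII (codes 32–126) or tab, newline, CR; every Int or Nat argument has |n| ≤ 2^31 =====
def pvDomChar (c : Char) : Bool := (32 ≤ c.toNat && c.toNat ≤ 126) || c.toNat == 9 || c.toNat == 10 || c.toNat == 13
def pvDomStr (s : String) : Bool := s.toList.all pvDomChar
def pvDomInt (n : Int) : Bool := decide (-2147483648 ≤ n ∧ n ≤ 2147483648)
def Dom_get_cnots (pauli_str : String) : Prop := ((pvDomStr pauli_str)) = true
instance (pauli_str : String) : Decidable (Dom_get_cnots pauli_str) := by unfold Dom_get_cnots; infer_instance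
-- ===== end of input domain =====

-- B replaces A's forward scan-with-break and accumulator by a full backward pass that tracks
-- the first 'I' index at position >= 1, then generates the pairs in one comprehension
-- (alternative traversal; A's dead guard on a function object never fires and is omitted).

-- ===== PORT A =====
-- the loop 'for i in range(len-1): if s[i+1]=='I': break; append (i+1,i)'
def get_cnots_loopA (cs : List Char) : List Int → List (Int × Int) → List (Int × Int)
  | [], acc => acc
  | i :: rest, acc =>
    if PySem.List.pyGet? cs (i + 1) = some 'I' then acc
    else get_cnots_loopA cs rest (acc ++ [(i + 1, i)])

def get_cnots (pauli_str : String) : List (Int × Int) :=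
  -- A's dead guard 'if not _no_pauli_after_i:' tests a function object (always truthy); never raises
  get_cnots_loopA pauli_str.toList
    (PySem.List.pyRange 0 ((pauli_str.toList.length : Int) - 1) 1) []

-- ===== PORT B =====
-- 'for i in reversed(range(1, n)): if pauli_str[i] == "I": boundary = i'
def get_cnots_altLoop (cs : List Char) : List Int → Int → Int
  | [], b => b
  | i :: rest, b =>
    get_cnots_altLoop cs rest (if PySem.List.pyGet? cs i = some 'I' then i else b)

def get_cnots_alt (pauli_str : String) : List (Int × Int) :=
  (PySem.List.pyRange 0
    (get_cnots_altLoop pauli_str.toList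
        ((PySem.List.pyRange 1 (pauli_str.toList.length : Int) 1).reverse)
        (pauli_str.toList.length : Int) - 1) 1).map (fun i => (i + 1, i))

-- ===== PRECONDITION & SPEC =====
def Spec_get_cnots (pauli_str : String) (out : List (Int × Int)) : Prop := out = get_cnots_alt pauli_str
instance (pauli_str : String) (out : List (Int × Int)) : Decidable (Spec_get_cnots pauli_str out) := by unfold Spec_get_cnots; infer_instance

-- ===== CLAIM (what is proved, stated in full; the proofs are below) =====
def Claim_equal_get_cnots : Prop := ∀ (pauli_str : String), Dom_get_cnots pauli_str → Spec_get_cnots pauli_str (get_cnots pauli_str)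

-- ===== LEMMAS AND PROOFS =====

-- length of the non-'I' prefix
def cntNI : List Char → Nat
  | [] => 0
  | c :: r => if c = 'I' then 0 else cntNI r + 1

lemma cntNI_le (tl : List Char) : cntNI tl ≤ tl.length := by
  induction tl with
  | nil => simp [cntNI]
  | cons c r ih =>
    by_cases h : c = 'I'
    · simp [cntNI, h]
    · simp only [cntNI, if_neg h, List.length_cons]; omega

-- A's loop, started at index a, emits acc ++ one pair per non-'I' char of cs.drop (a+1)
lemma loopA_eq_range (cs : List Char) :
    ∀ (k : Nat) (a : Int) (acc : List (Int × Int)), 0 ≤ a →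
      (((cs.length : Int) - 1) - a).toNat ≤ k →
      get_cnots_loopA cs (PySem.List.pyRange a ((cs.length : Int) - 1) 1) acc =
        acc ++ (PySem.List.pyRange a (a + (cntNI (cs.drop (a.toNat + 1)) : Int)) 1).map
          (fun i => (i + 1, i)) := by
  intro k
  induction k with
  | zero =>
    intro a acc h0 hk
    have hend : (cs.length : Int) - 1 ≤ a := by omega
    rw [PySem.List.pyRange_one_eq_nil hend]
    have hdrop : cs.drop (a.toNat + 1) = [] := by
      apply List.drop_eq_nil_of_le; omega
    rw [hdrop]
    simp only [cntNI, Nat.cast_zero, add_zero]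
    rw [PySem.List.pyRange_one_eq_nil (le_refl a)]
    simp [get_cnots_loopA]
  | succ k ih =>
    intro a acc h0 hk
    rcases lt_or_ge a ((cs.length : Int) - 1) with hlt | hge
    · rw [PySem.List.pyRange_one_cons hlt]
      have hidx : a.toNat + 1 < cs.length := by omega
      have hget : PySem.List.pyGet? cs (a + 1) = some cs[a.toNat + 1] := by
        have h1 : a + 1 = ((a.toNat + 1 : Nat) : Int) := by omega
        rw [h1, PySem.List.pyGet?_natCast, List.getElem?_eq_getElem hidx]
      have hdrop : cs.drop (a.toNat + 1) = cs[a.toNat + 1] :: cs.drop (a.toNat + 2) := by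
        rw [List.drop_eq_getElem_cons hidx]
      by_cases hI : cs[a.toNat + 1] = 'I'
      · rw [hdrop]
        simp only [cntNI, if_pos hI, Nat.cast_zero, add_zero]
        rw [PySem.List.pyRange_one_eq_nil (le_refl a)]
        simp [get_cnots_loopA, hget, hI]
      · have hkk : (((cs.length : Int) - 1) - (a + 1)).toNat ≤ k := by omega
        have hrec := ih (a + 1) (acc ++ [(a + 1, a)]) (by omega) hkk
        have hdrop' : cs.drop ((a + 1).toNat + 1) = cs.drop (a.toNat + 2) := by
          congr 1; omega
        rw [hdrop'] at hrec
        have hb : a + ((cntNI (cs.drop (a.toNat + 2)) + 1 : Nat) : Int) =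
            (a + 1) + (cntNI (cs.drop (a.toNat + 2)) : Int) := by push_cast; omega
        have hcons : PySem.List.pyRange a (a + (cntNI (cs.drop (a.toNat + 1)) : Int)) 1 =
            a :: PySem.List.pyRange (a + 1) ((a + 1) + (cntNI (cs.drop (a.toNat + 2)) : Int)) 1 := by
          rw [hdrop]
          simp only [cntNI, if_neg hI]
          rw [hb, PySem.List.pyRange_one_cons (by omega)]
        rw [hcons]
        simp only [get_cnots_loopA, hget, Option.some_inj, hI, if_false, hrec,
          List.map_cons, List.append_assoc, List.singleton_append]
    · rw [PySem.List.pyRange_one_eq_nil hge]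
      have hdrop : cs.drop (a.toNat + 1) = [] := by
        apply List.drop_eq_nil_of_le; omega
      rw [hdrop]
      simp only [cntNI, Nat.cast_zero, add_zero]
      rw [PySem.List.pyRange_one_eq_nil (le_refl a)]
      simp [get_cnots_loopA]

-- B's backward loop: processing one more (smallest) index last
lemma altLoop_append (cs : List Char) (l : List Int) (x : Int) (b : Int) :
    get_cnots_altLoop cs (l ++ [x]) b =
      if PySem.List.pyGet? cs x = some 'I' then x else get_cnots_altLoop cs l b := by
  induction l generalizing b with
  | nil => simp [get_cnots_altLoop]
  | cons y r ih => simp [get_cnots_altLoop, ih]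

-- B's backward pass over [a, n) finds the first 'I' index (via cntNI of the suffix) or keeps b
lemma altLoop_rev_range (cs : List Char) (b : Int) :
    ∀ (k : Nat) (a : Int), 1 ≤ a → ((cs.length : Int) - a).toNat ≤ k →
      get_cnots_altLoop cs ((PySem.List.pyRange a (cs.length : Int) 1).reverse) b =
        if (cntNI (cs.drop a.toNat) : Int) < (cs.length : Int) - a
        then a + (cntNI (cs.drop a.toNat) : Int) else b := by
  intro k
  induction k with
  | zero =>
    intro a h1 hk
    have hend : (cs.length : Int) ≤ a := by omega
    rw [PySem.List.pyRange_one_eq_nil hend]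
    have hdrop : cs.drop a.toNat = [] := by apply List.drop_eq_nil_of_le; omega
    rw [hdrop]
    simp only [List.reverse_nil, get_cnots_altLoop, cntNI]
    rw [if_neg (by omega)]
  | succ k ih =>
    intro a h1 hk
    rcases lt_or_ge a (cs.length : Int) with hlt | hge
    · rw [PySem.List.pyRange_one_cons hlt, List.reverse_cons, altLoop_append]
      have hidx : a.toNat < cs.length := by omega
      have hget : PySem.List.pyGet? cs a = some cs[a.toNat] := by
        have h1' : PySem.List.pyGet? cs ((a.toNat : Nat) : Int) = cs[a.toNat]? :=
          PySem.List.pyGet?_natCast cs a.toNat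
        rw [show ((a.toNat : Nat) : Int) = a from by omega] at h1'
        rw [h1', List.getElem?_eq_getElem hidx]
      have hdrop : cs.drop a.toNat = cs[a.toNat] :: cs.drop (a.toNat + 1) := by
        rw [List.drop_eq_getElem_cons hidx]
      by_cases hI : cs[a.toNat] = 'I'
      · rw [hget, if_pos (by rw [hI]), hdrop]
        simp only [cntNI, if_pos hI]
        rw [if_pos (by push_cast; omega)]
        push_cast; omega
      · rw [hget, if_neg (by simpa using hI)]
        have hrec := ih (a + 1) (by omega) (by omega)
        have hdrop' : cs.drop (a + 1).toNat = cs.drop (a.toNat + 1) := by congr 1; omega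
        rw [hdrop'] at hrec
        rw [hrec, hdrop]
        simp only [cntNI, if_neg hI]
        by_cases hlt' : (cntNI (cs.drop (a.toNat + 1)) : Int) < (cs.length : Int) - (a + 1)
        · rw [if_pos hlt', if_pos (by push_cast; omega)]
          push_cast; omega
        · rw [if_neg hlt', if_neg (by push_cast at hlt' ⊢; omega)]
    · rw [PySem.List.pyRange_one_eq_nil hge]
      have hdrop : cs.drop a.toNat = [] := by apply List.drop_eq_nil_of_le; omega
      rw [hdrop]
      simp only [List.reverse_nil, get_cnots_altLoop, cntNI]
      rw [if_neg (by omega)]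

lemma get_cnots_eq_alt (pauli_str : String) :
    get_cnots pauli_str = get_cnots_alt pauli_str := by
  unfold get_cnots get_cnots_alt
  generalize pauli_str.toList = cs
  have hA := loopA_eq_range cs ((((cs.length : Int) - 1) - 0).toNat) 0 [] (by omega) (le_refl _)
  simp only [List.nil_append, Int.toNat_zero, Nat.zero_add, Int.zero_add] at hA
  rw [hA]
  rcases Nat.eq_zero_or_pos cs.length with hn0 | hn1
  · -- empty string: both ranges are empty
    have hnil : cs = [] := List.eq_nil_of_length_eq_zero hn0
    subst hnil
    decide
  · have hB := altLoop_rev_range cs (cs.length : Int)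
      (((cs.length : Int) - 1).toNat) 1 (by omega) (le_refl _)
    have hdrop1 : cs.drop ((1 : Int)).toNat = cs.drop 1 := by norm_num
    rw [hdrop1] at hB
    have hcnt_le : cntNI (cs.drop 1) ≤ cs.length - 1 := by
      have := cntNI_le (cs.drop 1)
      simpa using this
    have hbound : get_cnots_altLoop cs ((PySem.List.pyRange 1 (cs.length : Int) 1).reverse)
        (cs.length : Int) - 1 = (cntNI (cs.drop 1) : Int) := by
      rw [hB]
      by_cases h : (cntNI (cs.drop 1) : Int) < (cs.length : Int) - 1
      · rw [if_pos h]; ring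
      · rw [if_neg h]; omega
    rw [hbound]

-- ===== VERDICT (by name: the statement is the Claim_ definition above) =====
theorem get_cnots_spec : Claim_equal_get_cnots := by
  intro pauli_str _
  unfold Spec_get_cnots
  exact get_cnots_eq_alt pauli_str
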